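-- pv_equiv track=rewrite | github.com/PaulJD91/users_logic_exercises | week_01/advanced_logic_exercise.py | list_count
-- ===== SOURCE A (Python) =====
-- def list_count(numbers):
--     sum = 0
--     stop = False
--     for number in numbers:
--         if number == 6:
--             stop = True
--         elif number == 7:
--             stop = False
--         elif stop == False:
--             sum = sum + number
--     return sum
-- ===== SOURCE B (Python) =====
-- def list_count(numbers):
--     total = 0
--     i = 0
--     n = len(numbers)
--     while i < n:
--         if numbers[i] == 6:
--             i += 1
--             while i < n and numbers[i] != 7:
--                 i += 1
--             i += 1  # step past the closing 7 (or past the end)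
--         elif numbers[i] == 7:
--             i += 1
--         else:
--             total += numbers[i]
--             i += 1
--     return total
-- ===== Notes on version B (the rewrite author's own statement) =====
-- stated objective: alternative
-- what changed: Replaces A's flag-driven single pass with an index walk that, on seeing a 6, runs an inner loop skipping forward past the closing 7 (treating a 6 with no closing 7 as suppressing the rest).
import Mathlib
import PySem

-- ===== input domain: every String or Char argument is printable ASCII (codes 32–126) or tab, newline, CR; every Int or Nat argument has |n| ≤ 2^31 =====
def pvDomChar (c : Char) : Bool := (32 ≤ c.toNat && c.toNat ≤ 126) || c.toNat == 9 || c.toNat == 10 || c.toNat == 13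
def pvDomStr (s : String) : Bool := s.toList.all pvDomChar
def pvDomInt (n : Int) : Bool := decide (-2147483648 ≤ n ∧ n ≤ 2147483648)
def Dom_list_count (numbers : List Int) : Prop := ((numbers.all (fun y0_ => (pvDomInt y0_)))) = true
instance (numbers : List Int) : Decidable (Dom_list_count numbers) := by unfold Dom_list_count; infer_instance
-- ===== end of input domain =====

-- B replaces A's flag-driven pass by an outer walk with an inner segment-skipping loop (alternative decomposition, same cost).


-- ===== PORT A =====
-- literal transliteration: fold over (sum, stop) with A's branch order
def list_count (numbers : List Int) : Int :=
  (numbers.foldl (fun (s : Int × Bool) number =>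
      if number = 6 then (s.1, true)
      else if number = 7 then (s.1, false)
      else if s.2 = false then (s.1 + number, s.2)
      else s) (0, false)).1

-- ===== PORT B =====
-- inner loop: skip forward until just past the first 7 (or to the end)
def pvSkipSeg : List Int → List Int
  | [] => []
  | x :: rest => if x = 7 then rest else pvSkipSeg rest

theorem pvSkipSeg_length_le : ∀ xs : List Int, (pvSkipSeg xs).length ≤ xs.length := by
  intro xs
  induction xs with
  | nil => simp [pvSkipSeg]
  | cons x rest ih =>
    simp only [pvSkipSeg]
    split
    · simp
    · exact Nat.le_trans ih (Nat.le_succ _)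

-- outer walk of Source B's while loop, as structural recursion on the remaining list
def list_count_alt : List Int → Int
  | [] => 0
  | x :: rest =>
    if x = 6 then list_count_alt (pvSkipSeg rest)
    else if x = 7 then list_count_alt rest
    else x + list_count_alt rest
termination_by xs => xs.length
decreasing_by
  · exact Nat.lt_succ_of_le (pvSkipSeg_length_le rest)
  · simp
  · simp

-- ===== PRECONDITION & SPEC =====
def Spec_list_count (numbers : List Int) (out : Int) : Prop := out = list_count_alt numbers
instance (numbers : List Int) (out : Int) : Decidable (Spec_list_count numbers out) := by unfold Spec_list_count; infer_instance

-- ===== CLAIM (what is proved, stated in full; the proofs are below) =====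
def Claim_equal_list_count : Prop := ∀ (numbers : List Int), Dom_list_count numbers → Spec_list_count numbers (list_count numbers)

-- ===== LEMMAS AND PROOFS =====
theorem pv_loop_eq : ∀ (xs : List Int) (s : Int) (b : Bool),
    (xs.foldl (fun (s : Int × Bool) number =>
      if number = 6 then (s.1, true)
      else if number = 7 then (s.1, false)
      else if s.2 = false then (s.1 + number, s.2)
      else s) (s, b)).1 = s + list_count_alt (if b then pvSkipSeg xs else xs) := by
  intro xs
  induction xs with
  | nil => intro s b; cases b <;> simp [list_count_alt, pvSkipSeg]
  | cons x rest ih =>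
    intro s b
    cases b with
    | false =>
      by_cases h6 : x = 6
      · simp [List.foldl, h6, ih, list_count_alt]
      · by_cases h7 : x = 7
        · simp [List.foldl, h7, ih, list_count_alt]
        · simp [List.foldl, h6, h7, ih, list_count_alt]; ring
    | true =>
      by_cases h6 : x = 6
      · simp [List.foldl, h6, ih, pvSkipSeg]
      · by_cases h7 : x = 7
        · simp [List.foldl, h7, ih, pvSkipSeg]
        · simp [List.foldl, h6, h7, ih, pvSkipSeg]

-- ===== VERDICT (by name: the statement is the Claim_ definition above) =====
theorem list_count_spec : Claim_equal_list_count := by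
  intro numbers _
  unfold Spec_list_count list_count
  simpa using pv_loop_eq numbers 0 false
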